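-- pv_equiv track=rewrite | github.com/themarcelor/perfectTheCraft | coding_questions/steps/steps.py | steps_rows_and_cols
-- ===== SOURCE A (Python) =====
-- def steps_rows_and_cols(num):
--     stairs = []
--     for r in range(0,num):
--         stair = ''
--
--         for c in range(0,num):
--             if c <= r:
--                 stair = stair + '#'
--             else:
--                 stair = stair + '_'
--         stairs.append(stair)
--     return '\n'.join(stairs)
-- ===== SOURCE B (Python) =====
-- def steps_rows_and_cols(num):
--     return '\n'.join('#' * (r + 1) + '_' * (num - r - 1) for r in range(num))
-- ===== Notes on version B (the rewrite author's own statement) =====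
-- stated objective: simpler
-- what changed: Replaces the per-cell nested loop with per-row run-length string construction ('#'*(r+1)+'_'*(num-r-1)) joined in one pass.
import Mathlib
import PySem

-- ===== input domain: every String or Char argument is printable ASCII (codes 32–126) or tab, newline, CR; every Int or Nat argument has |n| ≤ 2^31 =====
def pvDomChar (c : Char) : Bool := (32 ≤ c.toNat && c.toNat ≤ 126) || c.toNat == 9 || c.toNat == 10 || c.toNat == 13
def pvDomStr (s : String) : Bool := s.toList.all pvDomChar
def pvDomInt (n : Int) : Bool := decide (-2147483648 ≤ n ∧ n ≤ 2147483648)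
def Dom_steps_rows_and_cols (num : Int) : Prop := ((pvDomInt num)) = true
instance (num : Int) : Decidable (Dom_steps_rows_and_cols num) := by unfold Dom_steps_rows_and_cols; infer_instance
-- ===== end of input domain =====

-- B replaces A's per-cell nested loop/branch with per-row run-length construction ('#'*(r+1)+'_'*(num-r-1)); simpler, same output.


-- ===== PORT A =====
def steps_rows_and_cols (num : Int) : String :=
  let stairs : List String :=
    (PySem.List.pyRange 0 num 1).foldl (fun stairs r =>
      let stair : String :=
        (PySem.List.pyRange 0 num 1).foldl (fun stair c =>
          if c ≤ r then stair ++ "#" else stair ++ "_") ""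
      stairs ++ [stair]) []
  PySem.Str.join "\n" stairs

-- ===== PORT B =====
-- Python's  '#' * k  on strings is ported as PySem.List.pyRepeat ['#'] k wrapped back into a String (exact: k ≤ 0 gives "").
def steps_rows_and_cols_alt (num : Int) : String :=
  PySem.Str.join "\n"
    ((PySem.List.pyRange 0 num 1).map (fun r =>
      String.ofList (PySem.List.pyRepeat ['#'] (r + 1) ++ PySem.List.pyRepeat ['_'] (num - r - 1))))

-- ===== PRECONDITION & SPEC =====
def Spec_steps_rows_and_cols (num : Int) (out : String) : Prop := out = steps_rows_and_cols_alt num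
instance (num : Int) (out : String) : Decidable (Spec_steps_rows_and_cols num out) := by unfold Spec_steps_rows_and_cols; infer_instance

-- ===== CLAIM (what is proved, stated in full; the proofs are below) =====
def Claim_equal_steps_rows_and_cols : Prop := ∀ (num : Int), Dom_steps_rows_and_cols num → Spec_steps_rows_and_cols num (steps_rows_and_cols num)

-- ===== LEMMAS AND PROOFS =====

-- a foldl that appends one element per input IS a map
theorem pv_foldl_append_map {α β : Type} (f : α → β) (l : List α) (acc : List β) :
    l.foldl (fun acc x => acc ++ [f x]) acc = acc ++ l.map f := by
  induction l generalizing acc with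
  | nil => simp
  | cons x xs ih => simp [List.foldl_cons, ih]

-- A's inner column loop over range(0, m) produces min(m, r+1) '#'s then the rest '_'s (for 0 ≤ r)
theorem pv_inner (m : ℕ) (r : Int) (hr : 0 ≤ r) (s : String) :
    (PySem.List.pyRange 0 (m : Int) 1).foldl
        (fun stair c => if c ≤ r then stair ++ "#" else stair ++ "_") s
      = s ++ String.ofList (List.replicate (min m (r.toNat + 1)) '#'
            ++ List.replicate (m - (r.toNat + 1)) '_') := by
  induction m generalizing s with
  | zero =>
    rw [PySem.List.pyRange_one_eq_nil (by norm_num)]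
    simp
  | succ m ih =>
    have hc : ((m + 1 : ℕ) : Int) = (m : Int) + 1 := by push_cast; ring
    rw [hc, PySem.List.pyRange_one_succ_right (by positivity), List.foldl_append, ih]
    simp only [List.foldl_cons, List.foldl_nil]
    by_cases h : (m : Int) ≤ r
    · rw [if_pos h]
      have h1 : min (m + 1) (r.toNat + 1) = m + 1 := by omega
      have h2 : min m (r.toNat + 1) = m := by omega
      have h3 : m + 1 - (r.toNat + 1) = 0 := by omega
      have h4 : m - (r.toNat + 1) = 0 := by omega
      simp [h1, h2, h3, h4, List.replicate_succ' (n := m), String.ofList_append, String.append_assoc]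
    · rw [if_neg h]
      have h1 : min (m + 1) (r.toNat + 1) = r.toNat + 1 := by omega
      have h2 : min m (r.toNat + 1) = r.toNat + 1 := by omega
      have h3 : m + 1 - (r.toNat + 1) = (m - (r.toNat + 1)) + 1 := by omega
      simp [h1, h2, h3, List.replicate_succ' (n := m - (r.toNat + 1)), String.ofList_append, String.append_assoc]

theorem steps_rows_and_cols_eq_alt (num : Int) :
    steps_rows_and_cols num = steps_rows_and_cols_alt num := by
  unfold steps_rows_and_cols steps_rows_and_cols_alt
  rw [pv_foldl_append_map
    (f := fun r => (PySem.List.pyRange 0 num 1).foldl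
      (fun stair c => if c ≤ r then stair ++ "#" else stair ++ "_") "")]
  simp only [List.nil_append]
  congr 1
  apply List.map_congr_left
  intro r hr
  have hmem := (PySem.List.mem_pyRange_one).1 hr
  have hr0 : 0 ≤ r := hmem.1
  have hrn : r < num := hmem.2
  have hnum : ((num.toNat : ℕ) : Int) = num := Int.toNat_of_nonneg (by omega)
  rw [← hnum, pv_inner num.toNat r hr0 ""]
  rw [PySem.List.pyRepeat_singleton, PySem.List.pyRepeat_singleton]
  have h1 : min num.toNat (r.toNat + 1) = (r + 1).toNat := by omega
  have h2 : num.toNat - (r.toNat + 1) = (((num.toNat : ℕ) : Int) - r - 1).toNat := by rw [hnum]; omega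
  rw [h1, h2]
  simp

-- ===== VERDICT (by name: the statement is the Claim_ definition above) =====
theorem steps_rows_and_cols_spec : Claim_equal_steps_rows_and_cols := by
  intro num _
  unfold Spec_steps_rows_and_cols
  exact steps_rows_and_cols_eq_alt num
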